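-- pv_equiv track=rewrite | github.com/saranblue/quic | scoring.py | calculate_quiz_score
-- ===== SOURCE A (Python) =====
-- def calculate_quiz_score(questions, user_answers, time_left, category):
--     score = 0
--     streak = 0
--     max_streak = 0
--
--     for i, q in enumerate(questions):
--         if user_answers[i] == q.get('answer'):
--             score += 1
--             streak += 1
--             max_streak = max(max_streak, streak)
--         else:
--             streak = 0
--
--     bonus = 0
--     if category == 'Entertainment':
--         if max_streak >= 3:
--             bonus += 5
--         if time_left > 0:
--             bonus += int(time_left * 0.5)
--
--     total_score = score * 10 + bonus
--     return {
--         "raw_score": score,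
--         "bonus": bonus,
--         "total_score": total_score
--     }
-- ===== SOURCE B (Python) =====
-- def _leading_true(c):
--     k = 0
--     while k < len(c) and c[k]:
--         k += 1
--     return k
--
--
-- def _max_true_run(c):
--     if not c:
--         return 0
--     if not c[0]:
--         return _max_true_run(c[1:])
--     k = 1 + _leading_true(c[1:])
--     return max(k, _max_true_run(c[k:]))
--
--
-- def calculate_quiz_score(questions, user_answers, time_left, category):
--     correct = [user_answers[i] == q.get('answer') for i, q in enumerate(questions)]
--     score = sum(correct)
--     max_streak = _max_true_run(correct)
--     bonus = 0
--     if category == 'Entertainment':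
--         if max_streak >= 3:
--             bonus += 5
--         if time_left > 0:
--             bonus += time_left // 2
--     return {
--         "raw_score": score,
--         "bonus": bonus,
--         "total_score": score * 10 + bonus
--     }
-- ===== Notes on version B (the rewrite author's own statement) =====
-- stated objective: alternative
-- what changed: A threads score/streak/max_streak through one loop; B builds the correctness list, takes its sum for the raw score, and computes the maximal True-run length by a separate recursion over runs, then applies the same bonus rule.
-- outside the precondition, e.g. on calculate_quiz_score([{'answer': 'a'}], [], 5, 'Science'): A raises IndexError, B raises IndexError
import Mathlib
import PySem

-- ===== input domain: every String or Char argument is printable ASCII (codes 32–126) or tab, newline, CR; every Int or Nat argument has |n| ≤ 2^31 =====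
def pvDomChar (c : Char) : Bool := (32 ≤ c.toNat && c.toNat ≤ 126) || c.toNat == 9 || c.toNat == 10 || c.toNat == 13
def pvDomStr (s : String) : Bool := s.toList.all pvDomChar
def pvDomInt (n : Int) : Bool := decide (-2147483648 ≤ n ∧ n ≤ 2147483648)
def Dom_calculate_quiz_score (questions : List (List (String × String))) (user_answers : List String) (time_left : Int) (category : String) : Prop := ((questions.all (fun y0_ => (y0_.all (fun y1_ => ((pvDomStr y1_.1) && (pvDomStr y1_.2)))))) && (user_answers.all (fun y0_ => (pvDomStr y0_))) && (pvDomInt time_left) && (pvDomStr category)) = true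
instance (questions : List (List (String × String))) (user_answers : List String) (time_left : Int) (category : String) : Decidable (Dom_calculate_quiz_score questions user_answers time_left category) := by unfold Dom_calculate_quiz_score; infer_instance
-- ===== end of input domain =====

-- B replaces A's three-accumulator streak loop by a correctness list, a sum, and a recursive
-- maximal-true-run computation (same values, different decomposition; objective: alternative).
-- 'int(time_left * 0.5)' (only evaluated when time_left > 0) is ported as floor division by 2:
-- exact on the domain, since time_left * 0.5 is exact in double for |time_left| ≤ 2^31 and
-- int() truncation equals floor for positive values.

-- ===== PORT A =====
def calculate_quiz_score (questions : List (List (String × String))) (user_answers : List String) (time_left : Int) (category : String) : List (String × Int) :=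
  -- score, streak, max_streak threaded through the for-loop over enumerate(questions)
  let st : Int × Int × Int :=
    (PySem.List.enumerate questions).foldl
      (fun (acc : Int × Int × Int) p =>
        match PySem.List.pyGet? user_answers p.1 with
        | some ua =>
          if some ua == (PySem.Dict.mk p.2).get? "answer" then
            (acc.1 + 1, acc.2.1 + 1, max acc.2.2 (acc.2.1 + 1))
          else
            (acc.1, 0, acc.2.2)
        | none => (acc.1, 0, acc.2.2))   -- IndexError in Python: outside Pre_, value irrelevant
      (0, 0, 0)
  let score := st.1
  let max_streak := st.2.2
  let bonus : Int :=
    if category == "Entertainment" then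
      (if max_streak ≥ 3 then (5 : Int) else 0) +
      (if time_left > 0 then PySem.Int.floordiv time_left 2 else 0)
    else 0
  let total_score := score * 10 + bonus
  [("raw_score", score), ("bonus", bonus), ("total_score", total_score)]

-- ===== PORT B =====
-- _leading_true: count of leading True values
def pvLeadingTrue : List Bool → Nat
  | [] => 0
  | b :: t => if b then pvLeadingTrue t + 1 else 0

-- _max_true_run: length of the longest run of True, by recursion on runs
def pvMaxTrueRun : List Bool → Int
  | [] => 0
  | false :: t => pvMaxTrueRun t
  | true :: t =>
      let k := 1 + pvLeadingTrue t
      max (k : Int) (pvMaxTrueRun (List.drop k (true :: t)))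
termination_by c => c.length

def calculate_quiz_score_alt (questions : List (List (String × String))) (user_answers : List String) (time_left : Int) (category : String) : List (String × Int) :=
  let correct : List Bool :=
    (PySem.List.enumerate questions).map (fun p =>
      match PySem.List.pyGet? user_answers p.1 with
      | some ua => some ua == (PySem.Dict.mk p.2).get? "answer"
      | none => false)   -- IndexError in Python: outside Pre_, value irrelevant
  let score : Int := (correct.map (fun c => if c then (1 : Int) else 0)).sum
  let max_streak := pvMaxTrueRun correct
  let bonus : Int :=
    if category == "Entertainment" then
      (if max_streak ≥ 3 then (5 : Int) else 0) +
      (if time_left > 0 then PySem.Int.floordiv time_left 2 else 0)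
    else 0
  [("raw_score", score), ("bonus", bonus), ("total_score", score * 10 + bonus)]

-- ===== PRECONDITION & SPEC =====
-- Pre_: user_answers must cover every index of questions, else Python's user_answers[i] raises IndexError.
def Pre_calculate_quiz_score (questions : List (List (String × String))) (user_answers : List String) (time_left : Int) (category : String) : Prop :=
  questions.length ≤ user_answers.length
instance (questions : List (List (String × String))) (user_answers : List String) (time_left : Int) (category : String) : Decidable (Pre_calculate_quiz_score questions user_answers time_left category) := by unfold Pre_calculate_quiz_score; infer_instance

def pvWitness_calculate_quiz_score : (List (List (String × String))) × List String × Int × String :=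
  ([[("answer", "a")], [("answer", "b")]], ["a", "a"], 7, "Entertainment")

def Spec_calculate_quiz_score (questions : List (List (String × String))) (user_answers : List String) (time_left : Int) (category : String) (out : List (String × Int)) : Prop := out = calculate_quiz_score_alt questions user_answers time_left category
instance (questions : List (List (String × String))) (user_answers : List String) (time_left : Int) (category : String) (out : List (String × Int)) : Decidable (Spec_calculate_quiz_score questions user_answers time_left category out) := by unfold Spec_calculate_quiz_score; infer_instance

-- ===== CLAIM (what is proved, stated in full; the proofs are below) =====
def Claim_equal_calculate_quiz_score : Prop := ∀ (questions : List (List (String × String))) (user_answers : List String) (time_left : Int) (category : String), Dom_calculate_quiz_score questions user_answers time_left category → Pre_calculate_quiz_score questions user_answers time_left category → Spec_calculate_quiz_score questions user_answers time_left category (calculate_quiz_score questions user_answers time_left category)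

-- ===== LEMMAS AND PROOFS =====

-- A's loop step, on the already-computed correctness bit
def pvStepA (acc : Int × Int × Int) (c : Bool) : Int × Int × Int :=
  if c then (acc.1 + 1, acc.2.1 + 1, max acc.2.2 (acc.2.1 + 1)) else (acc.1, 0, acc.2.2)

-- max-streak with a carried-in current streak
def pvMcar (st : Int) : List Bool → Int
  | [] => st
  | true :: t => pvMcar (st + 1) t
  | false :: t => max st (pvMcar 0 t)

lemma pvStepA_false (acc : Int × Int × Int) : pvStepA acc false = (acc.1, 0, acc.2.2) := rfl
lemma pvStepA_true (acc : Int × Int × Int) :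
    pvStepA acc true = (acc.1 + 1, acc.2.1 + 1, max acc.2.2 (acc.2.1 + 1)) := rfl
lemma pvMcar_false (c : Int) (t : List Bool) : pvMcar c (false :: t) = max c (pvMcar 0 t) := rfl
lemma pvMcar_true (c : Int) (t : List Bool) : pvMcar c (true :: t) = pvMcar (c + 1) t := rfl
lemma pvLeadingTrue_false (t : List Bool) : pvLeadingTrue (false :: t) = 0 := rfl
lemma pvLeadingTrue_true (t : List Bool) : pvLeadingTrue (true :: t) = pvLeadingTrue t + 1 := rfl

lemma pvMaxTrueRun_false (t : List Bool) : pvMaxTrueRun (false :: t) = pvMaxTrueRun t := by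
  rw [pvMaxTrueRun]

lemma pvMaxTrueRun_true (t : List Bool) :
    pvMaxTrueRun (true :: t)
      = max (((1 + pvLeadingTrue t : Nat) : Int)) (pvMaxTrueRun (List.drop (pvLeadingTrue t) t)) := by
  rw [pvMaxTrueRun]
  have : List.drop (1 + pvLeadingTrue t) (true :: t) = List.drop (pvLeadingTrue t) t := by
    rw [Nat.add_comm, List.drop_succ_cons]
  rw [this]

lemma pvMcar_ge (bs : List Bool) (st : Int) : st ≤ pvMcar st bs := by
  induction bs generalizing st with
  | nil => simp [pvMcar]
  | cons b t ih =>
    cases b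
    · exact le_max_left _ _
    · exact le_trans (by omega) (ih (st + 1))

lemma pvFold_fst (bs : List Bool) (s st m : Int) :
    ((bs.foldl pvStepA (s, st, m)).1) = s + (bs.map (fun c => if c then (1 : Int) else 0)).sum := by
  induction bs generalizing s st m with
  | nil => simp
  | cons b t ih =>
    cases b <;>
      simp only [List.foldl_cons, pvStepA_false, pvStepA_true, List.map_cons, List.sum_cons,
        Bool.false_eq_true, if_false, if_true, ih] <;> ring

lemma pvFold_max (bs : List Bool) (s st m : Int) (h0 : 0 ≤ st) (h1 : st ≤ m) :
    ((bs.foldl pvStepA (s, st, m)).2.2) = max m (pvMcar st bs) := by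
  induction bs generalizing s st m with
  | nil => simp [pvMcar, max_eq_left h1]
  | cons b t ih =>
    cases b
    · simp only [List.foldl_cons, pvStepA_false, pvMcar_false]
      rw [ih s 0 m le_rfl (le_trans h0 h1), ← max_assoc, max_eq_left h1]
    · simp only [List.foldl_cons, pvStepA_true, pvMcar_true]
      rw [ih (s + 1) (st + 1) (max m (st + 1)) (by omega) (le_max_right _ _),
        max_assoc, max_eq_right (pvMcar_ge t (st + 1))]

lemma pvMcar_carry (t : List Bool) (c : Int) (hc : 0 ≤ c) :
    pvMcar c t = max (c + (pvLeadingTrue t : Int)) (pvMcar 0 (List.drop (pvLeadingTrue t) t)) := by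
  induction t generalizing c with
  | nil => simp [pvMcar, pvLeadingTrue, max_eq_left hc]
  | cons b t ih =>
    cases b
    · rw [pvMcar_false, pvLeadingTrue_false]
      simp only [Nat.cast_zero, add_zero, List.drop_zero]
      rw [pvMcar_false, max_eq_right (pvMcar_ge t 0)]
    · rw [pvMcar_true, pvLeadingTrue_true, ih (c + 1) (by omega), List.drop_succ_cons]
      congr 1
      push_cast
      ring

lemma pvMcar_zero_eq_aux : ∀ (n : Nat) (bs : List Bool), bs.length ≤ n → pvMcar 0 bs = pvMaxTrueRun bs := by
  intro n
  induction n with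
  | zero =>
    intro bs h
    have hbs : bs = [] := List.eq_nil_of_length_eq_zero (Nat.le_zero.mp h)
    subst hbs
    rw [show pvMcar 0 ([] : List Bool) = 0 from rfl, pvMaxTrueRun]
  | succ n ih =>
    intro bs h
    match bs with
    | [] => rw [show pvMcar 0 ([] : List Bool) = 0 from rfl, pvMaxTrueRun]
    | false :: t =>
      rw [pvMcar_false, max_eq_right (pvMcar_ge t 0), pvMaxTrueRun_false]
      exact ih t (by simpa using Nat.le_of_succ_le_succ (by simpa using h))
    | true :: t =>
      rw [pvMcar_true]
      simp only [zero_add]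
      rw [pvMcar_carry t 1 (by omega), pvMaxTrueRun_true]
      have hlen : (List.drop (pvLeadingTrue t) t).length ≤ n := by
        have := List.length_drop (l := t) (i := pvLeadingTrue t)
        simp at h; omega
      rw [ih _ hlen]
      congr 1

lemma pvMcar_zero_eq (bs : List Bool) : pvMcar 0 bs = pvMaxTrueRun bs :=
  pvMcar_zero_eq_aux bs.length bs le_rfl

-- ===== VERDICT (by name: the statement is the Claim_ definition above) =====
theorem calculate_quiz_score_spec : Claim_equal_calculate_quiz_score := by
  intro questions user_answers time_left category _ _
  unfold Spec_calculate_quiz_score calculate_quiz_score calculate_quiz_score_alt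
  rw [show
    ((PySem.List.enumerate questions).foldl
      (fun (acc : Int × Int × Int) p =>
        match PySem.List.pyGet? user_answers p.1 with
        | some ua =>
          if some ua == (PySem.Dict.mk p.2).get? "answer" then
            (acc.1 + 1, acc.2.1 + 1, max acc.2.2 (acc.2.1 + 1))
          else (acc.1, 0, acc.2.2)
        | none => (acc.1, 0, acc.2.2))
      ((0 : Int), (0 : Int), (0 : Int)))
    = (((PySem.List.enumerate questions).map (fun p =>
        match PySem.List.pyGet? user_answers p.1 with
        | some ua => some ua == (PySem.Dict.mk p.2).get? "answer"
        | none => false)).foldl pvStepA ((0 : Int), 0, 0)) from ?_]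
  · dsimp only
    rw [pvFold_fst, pvFold_max _ _ _ _ le_rfl le_rfl, pvMcar_zero_eq]
    simp
  · rw [List.foldl_map]
    apply PySem.List.foldl_congr_mem
    intro acc p _
    cases hg : PySem.List.pyGet? user_answers p.1 with
    | none => simp [pvStepA]
    | some ua =>
      by_cases hc : some ua == (PySem.Dict.mk p.2).get? "answer" <;> simp [pvStepA, hc]
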